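-- pv_equiv track=rewrite | github.com/albertfast/budget-tracker | backend/app/services/transaction_service.py | _enhance_category_with_merchant
-- ===== SOURCE A (Python) =====
-- from typing import List, Dict, Any, Optional
--
-- def _enhance_category_with_merchant(merchant_name: str, current_category: str) -> Optional[str]:
--     """Enhance categorization using merchant name patterns"""
--     merchant_lower = merchant_name.lower()
--
--     # Grocery stores
--     if any(term in merchant_lower for term in ['grocery', 'market', 'food', 'kroger', 'walmart', 'target']):
--         return "Food and Drink"
--
--     # Gas stations
--     if any(term in merchant_lower for term in ['gas', 'fuel', 'shell', 'exxon', 'bp', 'chevron']):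
--         return "Transportation"
--
--     # Restaurants
--     if any(term in merchant_lower for term in ['restaurant', 'cafe', 'coffee', 'pizza', 'burger']):
--         return "Food and Drink"
--
--     # Shopping
--     if any(term in merchant_lower for term in ['amazon', 'store', 'shop', 'retail']):
--         return "Shops"
--
--     return None
-- ===== SOURCE B (Python) =====
-- from typing import Optional
--
-- # Single left-to-right scan of the lowercased name: at each position, hash-probe
-- # the few possible keyword lengths and keep the best (lowest) rule priority seen.
-- _CATEGORIES = ["Food and Drink", "Transportation", "Food and Drink", "Shops"]
-- _KEYWORDS = {
--     'grocery': 0, 'market': 0, 'food': 0, 'kroger': 0, 'walmart': 0, 'target': 0,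
--     'gas': 1, 'fuel': 1, 'shell': 1, 'exxon': 1, 'bp': 1, 'chevron': 1,
--     'restaurant': 2, 'cafe': 2, 'coffee': 2, 'pizza': 2, 'burger': 2,
--     'amazon': 3, 'store': 3, 'shop': 3, 'retail': 3,
-- }
-- _LENGTHS = sorted({len(k) for k in _KEYWORDS})
--
-- def _enhance_category_with_merchant(merchant_name: str, current_category: str) -> Optional[str]:
--     s = merchant_name.lower()
--     best = None
--     for i in range(len(s)):
--         for L in _LENGTHS:
--             p = _KEYWORDS.get(s[i:i + L])
--             if p is not None and (best is None or p < best):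
--                 best = p
--     return _CATEGORIES[best] if best is not None else None
-- ===== Notes on version B (the rewrite author's own statement) =====
-- stated objective: alternative
-- what changed: Instead of testing each keyword against the whole string rule by rule, B makes a single left-to-right scan over the lowercased name, hash-probing a keyword->priority dict with the substring at each position for each possible keyword length, keeping the minimal rule priority and mapping it to its category at the end.
import Mathlib
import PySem

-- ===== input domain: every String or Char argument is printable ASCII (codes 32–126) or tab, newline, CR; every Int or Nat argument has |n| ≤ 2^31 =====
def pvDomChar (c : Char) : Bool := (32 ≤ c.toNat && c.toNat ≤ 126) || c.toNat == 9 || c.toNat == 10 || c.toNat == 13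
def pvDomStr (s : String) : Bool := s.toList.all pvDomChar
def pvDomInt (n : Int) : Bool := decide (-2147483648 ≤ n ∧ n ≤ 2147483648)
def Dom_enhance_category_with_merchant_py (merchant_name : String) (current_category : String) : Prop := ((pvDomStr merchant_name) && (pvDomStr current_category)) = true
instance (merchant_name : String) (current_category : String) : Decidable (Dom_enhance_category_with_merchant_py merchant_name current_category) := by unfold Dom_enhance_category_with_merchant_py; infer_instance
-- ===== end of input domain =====

-- B replaces A's rule-by-rule substring searches with a single positional scan of the
-- lowercased name (a keyword→priority dict probed per position and length, keeping the
-- minimal rule priority); objective: alternative algorithm, same exact result.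

-- ===== PORT A =====
def enhance_category_with_merchant_py (merchant_name : String) (current_category : String) : Option String :=
  let merchant_lower := PySem.Str.lower merchant_name
  if (["grocery", "market", "food", "kroger", "walmart", "target"]).any
      (fun term => PySem.Str.isIn term merchant_lower) then some "Food and Drink"
  else if (["gas", "fuel", "shell", "exxon", "bp", "chevron"]).any
      (fun term => PySem.Str.isIn term merchant_lower) then some "Transportation"
  else if (["restaurant", "cafe", "coffee", "pizza", "burger"]).any
      (fun term => PySem.Str.isIn term merchant_lower) then some "Food and Drink"
  else if (["amazon", "store", "shop", "retail"]).any
      (fun term => PySem.Str.isIn term merchant_lower) then some "Shops"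
  else none

-- ===== PORT B =====
def pvAltCategories : List String := ["Food and Drink", "Transportation", "Food and Drink", "Shops"]

def pvAltKeywords : PySem.Dict String Nat := PySem.Dict.ofList
  [("grocery", 0), ("market", 0), ("food", 0), ("kroger", 0), ("walmart", 0), ("target", 0),
   ("gas", 1), ("fuel", 1), ("shell", 1), ("exxon", 1), ("bp", 1), ("chevron", 1),
   ("restaurant", 2), ("cafe", 2), ("coffee", 2), ("pizza", 2), ("burger", 2),
   ("amazon", 3), ("store", 3), ("shop", 3), ("retail", 3)]

def pvAltLengths : List Nat := [2, 3, 4, 5, 6, 7, 10]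

def enhance_category_with_merchant_py_alt (merchant_name : String) (current_category : String) : Option String :=
  let s := PySem.Str.lower merchant_name
  let best : Option Nat :=
    (PySem.List.pyRange 0 (PySem.Str.len s) 1).foldl (fun best i =>
      pvAltLengths.foldl (fun best (L : Nat) =>
        match pvAltKeywords.get? (PySem.Str.slice s (some i) (some (i + (L : Int)))) with
        | some p => if best.isNone ∨ p < best.getD 0 then some p else best
        | none => best) best) none
  match best with
  | some p => PySem.List.pyGet? pvAltCategories (p : Int)  -- p < 4 always, so in range
  | none => none

-- ===== PRECONDITION & SPEC =====
def Spec_enhance_category_with_merchant_py (merchant_name : String) (current_category : String) (out : Option String) : Prop := out = enhance_category_with_merchant_py_alt merchant_name current_category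
instance (merchant_name : String) (current_category : String) (out : Option String) : Decidable (Spec_enhance_category_with_merchant_py merchant_name current_category out) := by unfold Spec_enhance_category_with_merchant_py; infer_instance

-- ===== CLAIM (what is proved, stated in full; the proofs are below) =====
def Claim_equal_enhance_category_with_merchant_py : Prop := ∀ (merchant_name : String) (current_category : String), Dom_enhance_category_with_merchant_py merchant_name current_category → Spec_enhance_category_with_merchant_py merchant_name current_category (enhance_category_with_merchant_py merchant_name current_category)

-- ===== LEMMAS AND PROOFS =====
def pvStep (b : Option Nat) (c : Option Nat) : Option Nat :=
  match c with
  | some p => if b.isNone ∨ p < b.getD 0 then some p else b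
  | none => b

def pvKwPairs : List (String × Nat) :=
  [("grocery", 0), ("market", 0), ("food", 0), ("kroger", 0), ("walmart", 0), ("target", 0),
   ("gas", 1), ("fuel", 1), ("shell", 1), ("exxon", 1), ("bp", 1), ("chevron", 1),
   ("restaurant", 2), ("cafe", 2), ("coffee", 2), ("pizza", 2), ("burger", 2),
   ("amazon", 3), ("store", 3), ("shop", 3), ("retail", 3)]

lemma pvKw_get (k : String) (q : Nat) :
    pvAltKeywords.get? k = some q ↔ (k, q) ∈ pvKwPairs := by
  have hnd : pvAltKeywords.keys.Nodup := by decide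
  have hit : pvAltKeywords.items = pvKwPairs := by rfl
  rw [PySem.Dict.get?_eq_some_iff_mem_items _ _ _ hnd, hit]


lemma pvMin_cons (v : List Nat) (p q : Nat) :
    ((q : Nat) :: p :: v).min? = (min q p :: v).min? := by
  rw [List.min?_cons', List.min?_cons', List.foldl_cons]

lemma pvStep_some_some (q p : Nat) : pvStep (some q) (some p) = some (min q p) := by
  simp only [pvStep, Option.isNone_some, Option.getD_some]
  split_ifs with h <;> simp_all [Nat.min_def]

-- pvStep-fold computes the minimum of the `some` candidates
lemma pvStep_fold (l : List (Option Nat)) (b : Option Nat) :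
    l.foldl pvStep b = ((b :: l).filterMap id).min? := by
  induction l generalizing b with
  | nil => cases b <;> simp [List.min?]
  | cons x t ih =>
      rw [List.foldl_cons, ih]
      cases x with
      | none => cases b <;> simp [pvStep]
      | some p =>
          cases b with
          | none => simp [pvStep]
          | some q =>
              rw [pvStep_some_some]
              simp only [List.filterMap_cons, id]
              exact (pvMin_cons (List.filterMap id t) p q).symm

def pvCands (m : String) : List (Option Nat) :=
  (PySem.List.pyRange 0 (PySem.Str.len (PySem.Str.lower m)) 1).flatMap (fun i =>
    pvAltLengths.map (fun (L : Nat) =>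
      pvAltKeywords.get? (PySem.Str.slice (PySem.Str.lower m) (some i) (some (i + (L : Int))))))

lemma pvFoldl_nested {α β : Type} (outer : List α) (inner : List β)
    (g : α → β → Option Nat) (b : Option Nat) :
    outer.foldl (fun b i => inner.foldl (fun b L => pvStep b (g i L)) b) b
      = (outer.flatMap (fun i => inner.map (g i))).foldl pvStep b := by
  induction outer generalizing b with
  | nil => rfl
  | cons x t ih =>
      rw [List.foldl_cons, ih, List.flatMap_cons, List.foldl_append, List.foldl_map]

lemma pvMatch_eq_pvStep (b co : Option Nat) :
    (match co with
     | some p => if b.isNone ∨ p < b.getD 0 then some p else b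
     | none => b) = pvStep b co := by
  cases co <;> rfl

lemma pvAlt_eq (m c : String) :
    enhance_category_with_merchant_py_alt m c =
      Option.elim ((pvCands m).filterMap id).min?
        none (fun p => PySem.List.pyGet? pvAltCategories (p : Int)) := by
  unfold enhance_category_with_merchant_py_alt pvCands
  simp only [pvMatch_eq_pvStep]
  rw [pvFoldl_nested (PySem.List.pyRange 0 (PySem.Str.len (PySem.Str.lower m)) 1)
    pvAltLengths
    (fun i L =>
      pvAltKeywords.get? (PySem.Str.slice (PySem.Str.lower m) (some i) (some (i + (L : Int)))))
    none, pvStep_fold]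
  simp only [List.filterMap_cons, id_eq]
  generalize ((List.filterMap (fun x => x) (List.flatMap (fun i =>
    List.map (fun (L : Nat) => pvAltKeywords.get? (PySem.Str.slice (PySem.Str.lower m) (some i) (some (i + (L : Int))))) pvAltLengths)
    (PySem.List.pyRange 0 (PySem.Str.len (PySem.Str.lower m)) 1))).min? : Option Nat) = r
  cases r <;> rfl

lemma pvKw_facts : ∀ kv ∈ pvKwPairs, kv.1.toList ≠ [] ∧ kv.1.toList.length ∈ pvAltLengths := by
  decide

lemma pvMem_vals (m : String) (q : Nat) :
    q ∈ (pvCands m).filterMap id ↔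
      ∃ kv ∈ pvKwPairs, kv.2 = q ∧ PySem.Str.isIn kv.1 (PySem.Str.lower m) = true := by
  constructor
  · rintro hq
    rw [List.mem_filterMap] at hq
    obtain ⟨co, hco, hid⟩ := hq
    simp only [id_eq] at hid; subst hid
    simp only [pvCands, List.mem_flatMap, List.mem_map, PySem.List.mem_pyRange_one] at hco
    obtain ⟨i, ⟨hi0, hin⟩, L, hL, hget⟩ := hco
    have hkv := (pvKw_get _ q).mp hget
    refine ⟨_, hkv, rfl, ?_⟩
    rw [PySem.Str.isIn_eq, PySem.Chars.isIn_iff_infix]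
    have hts : (PySem.Str.slice (PySem.Str.lower m) (some i) (some (i + (L : Int)))).toList
        = ((PySem.Str.lower m).toList.drop i.toNat).take ((i + (L : Int)).toNat - i.toNat) := by
      simp only [PySem.Str.toList_slice, PySem.Chars.slice_eq_listSlice]
      exact PySem.List.slice_toNat _ hi0 (by omega)
    rw [hts]
    exact (List.take_prefix _ _).isInfix.trans (List.drop_suffix _ _).isInfix
  · rintro ⟨kv, hkv, hq, hin⟩
    obtain ⟨hne, hlen⟩ := pvKw_facts kv hkv
    rw [PySem.Str.isIn_eq] at hin
    rw [← PySem.Chars.exists_prefix_drop_iff_isIn] at hin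
    obtain ⟨j, hpre⟩ := hin
    have hjlt : j < (PySem.Str.lower m).toList.length := by
      by_contra hge
      rw [List.drop_eq_nil_of_le (by omega)] at hpre
      exact hne (List.prefix_nil.mp hpre)
    rw [List.mem_filterMap]
    refine ⟨some q, ?_, rfl⟩
    simp only [pvCands, List.mem_flatMap, List.mem_map, PySem.List.mem_pyRange_one]
    refine ⟨(j : Int), ⟨by omega, ?_⟩, kv.1.toList.length, hlen, ?_⟩
    · have : PySem.Str.len (PySem.Str.lower m) = ((PySem.Str.lower m).toList.length : Int) := by
        simp [pysem]
      omega
    · have hslice : (PySem.Str.slice (PySem.Str.lower m) (some (j : Int))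
          (some ((j : Int) + (kv.1.toList.length : Int)))).toList = kv.1.toList := by
        simp only [PySem.Str.toList_slice, PySem.Chars.slice_eq_listSlice]
        rw [PySem.List.slice_toNat _ (by omega) (by omega)]
        have h1 : ((j : Int) + (kv.1.toList.length : Int)).toNat - (j : Int).toNat
            = kv.1.toList.length := by omega
        rw [h1, Int.toNat_natCast]
        exact (List.prefix_iff_eq_take.mp hpre).symm
      have : PySem.Str.slice (PySem.Str.lower m) (some (j : Int))
          (some ((j : Int) + (kv.1.toList.length : Int))) = kv.1 :=
        String.toList_inj.mp hslice
      rw [this]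
      exact (pvKw_get kv.1 q).mpr (hq ▸ hkv)

set_option maxHeartbeats 3200000 in
lemma pvVals_iff (m : String) (q : Nat) :
    q ∈ (pvCands m).filterMap id ↔
      ((q = 0 ∧ (["grocery", "market", "food", "kroger", "walmart", "target"]).any
          (fun t => PySem.Str.isIn t (PySem.Str.lower m)) = true) ∨
       (q = 1 ∧ (["gas", "fuel", "shell", "exxon", "bp", "chevron"]).any
          (fun t => PySem.Str.isIn t (PySem.Str.lower m)) = true) ∨
       (q = 2 ∧ (["restaurant", "cafe", "coffee", "pizza", "burger"]).any
          (fun t => PySem.Str.isIn t (PySem.Str.lower m)) = true) ∨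
       (q = 3 ∧ (["amazon", "store", "shop", "retail"]).any
          (fun t => PySem.Str.isIn t (PySem.Str.lower m)) = true)) := by
  rw [pvMem_vals]
  simp only [pvKwPairs, List.mem_cons, List.not_mem_nil, List.any_cons, List.any_nil,
    Bool.or_eq_true, or_false]
  constructor
  · rintro ⟨kv, hkv, hq, hin⟩
    rcases hkv with h|h|h|h|h|h|h|h|h|h|h|h|h|h|h|h|h|h|h|h|h
    all_goals (subst h; dsimp only at hq hin; subst hq)
    · exact Or.inl (⟨rfl, Or.inl hin⟩)
    · exact Or.inl (⟨rfl, Or.inr (Or.inl hin)⟩)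
    · exact Or.inl (⟨rfl, Or.inr (Or.inr (Or.inl hin))⟩)
    · exact Or.inl (⟨rfl, Or.inr (Or.inr (Or.inr (Or.inl hin)))⟩)
    · exact Or.inl (⟨rfl, Or.inr (Or.inr (Or.inr (Or.inr (Or.inl hin))))⟩)
    · exact Or.inl (⟨rfl, Or.inr (Or.inr (Or.inr (Or.inr (Or.inr (Or.inl hin)))))⟩)
    · exact Or.inr (Or.inl (⟨rfl, Or.inl hin⟩))
    · exact Or.inr (Or.inl (⟨rfl, Or.inr (Or.inl hin)⟩))
    · exact Or.inr (Or.inl (⟨rfl, Or.inr (Or.inr (Or.inl hin))⟩))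
    · exact Or.inr (Or.inl (⟨rfl, Or.inr (Or.inr (Or.inr (Or.inl hin)))⟩))
    · exact Or.inr (Or.inl (⟨rfl, Or.inr (Or.inr (Or.inr (Or.inr (Or.inl hin))))⟩))
    · exact Or.inr (Or.inl (⟨rfl, Or.inr (Or.inr (Or.inr (Or.inr (Or.inr (Or.inl hin)))))⟩))
    · exact Or.inr (Or.inr (Or.inl (⟨rfl, Or.inl hin⟩)))
    · exact Or.inr (Or.inr (Or.inl (⟨rfl, Or.inr (Or.inl hin)⟩)))
    · exact Or.inr (Or.inr (Or.inl (⟨rfl, Or.inr (Or.inr (Or.inl hin))⟩)))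
    · exact Or.inr (Or.inr (Or.inl (⟨rfl, Or.inr (Or.inr (Or.inr (Or.inl hin)))⟩)))
    · exact Or.inr (Or.inr (Or.inl (⟨rfl, Or.inr (Or.inr (Or.inr (Or.inr (Or.inl hin))))⟩)))
    · exact Or.inr (Or.inr (Or.inr (⟨rfl, Or.inl hin⟩)))
    · exact Or.inr (Or.inr (Or.inr (⟨rfl, Or.inr (Or.inl hin)⟩)))
    · exact Or.inr (Or.inr (Or.inr (⟨rfl, Or.inr (Or.inr (Or.inl hin))⟩)))
    · exact Or.inr (Or.inr (Or.inr (⟨rfl, Or.inr (Or.inr (Or.inr (Or.inl hin)))⟩)))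
  · rintro (⟨hq, hin⟩|⟨hq, hin⟩|⟨hq, hin⟩|⟨hq, hin⟩) <;> subst hq
    · rcases hin with h|h|h|h|h|h|h
      · exact ⟨("grocery", 0), Or.inl (rfl), rfl, h⟩
      · exact ⟨("market", 0), Or.inr (Or.inl (rfl)), rfl, h⟩
      · exact ⟨("food", 0), Or.inr (Or.inr (Or.inl (rfl))), rfl, h⟩
      · exact ⟨("kroger", 0), Or.inr (Or.inr (Or.inr (Or.inl (rfl)))), rfl, h⟩
      · exact ⟨("walmart", 0), Or.inr (Or.inr (Or.inr (Or.inr (Or.inl (rfl))))), rfl, h⟩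
      · exact ⟨("target", 0), Or.inr (Or.inr (Or.inr (Or.inr (Or.inr (Or.inl (rfl)))))), rfl, h⟩
      · simp at h
    · rcases hin with h|h|h|h|h|h|h
      · exact ⟨("gas", 1), Or.inr (Or.inr (Or.inr (Or.inr (Or.inr (Or.inr (Or.inl (rfl))))))), rfl, h⟩
      · exact ⟨("fuel", 1), Or.inr (Or.inr (Or.inr (Or.inr (Or.inr (Or.inr (Or.inr (Or.inl (rfl)))))))), rfl, h⟩
      · exact ⟨("shell", 1), Or.inr (Or.inr (Or.inr (Or.inr (Or.inr (Or.inr (Or.inr (Or.inr (Or.inl (rfl))))))))), rfl, h⟩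
      · exact ⟨("exxon", 1), Or.inr (Or.inr (Or.inr (Or.inr (Or.inr (Or.inr (Or.inr (Or.inr (Or.inr (Or.inl (rfl)))))))))), rfl, h⟩
      · exact ⟨("bp", 1), Or.inr (Or.inr (Or.inr (Or.inr (Or.inr (Or.inr (Or.inr (Or.inr (Or.inr (Or.inr (Or.inl (rfl))))))))))), rfl, h⟩
      · exact ⟨("chevron", 1), Or.inr (Or.inr (Or.inr (Or.inr (Or.inr (Or.inr (Or.inr (Or.inr (Or.inr (Or.inr (Or.inr (Or.inl (rfl)))))))))))), rfl, h⟩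
      · simp at h
    · rcases hin with h|h|h|h|h|h
      · exact ⟨("restaurant", 2), Or.inr (Or.inr (Or.inr (Or.inr (Or.inr (Or.inr (Or.inr (Or.inr (Or.inr (Or.inr (Or.inr (Or.inr (Or.inl (rfl))))))))))))), rfl, h⟩
      · exact ⟨("cafe", 2), Or.inr (Or.inr (Or.inr (Or.inr (Or.inr (Or.inr (Or.inr (Or.inr (Or.inr (Or.inr (Or.inr (Or.inr (Or.inr (Or.inl (rfl)))))))))))))), rfl, h⟩
      · exact ⟨("coffee", 2), Or.inr (Or.inr (Or.inr (Or.inr (Or.inr (Or.inr (Or.inr (Or.inr (Or.inr (Or.inr (Or.inr (Or.inr (Or.inr (Or.inr (Or.inl (rfl))))))))))))))), rfl, h⟩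
      · exact ⟨("pizza", 2), Or.inr (Or.inr (Or.inr (Or.inr (Or.inr (Or.inr (Or.inr (Or.inr (Or.inr (Or.inr (Or.inr (Or.inr (Or.inr (Or.inr (Or.inr (Or.inl (rfl)))))))))))))))), rfl, h⟩
      · exact ⟨("burger", 2), Or.inr (Or.inr (Or.inr (Or.inr (Or.inr (Or.inr (Or.inr (Or.inr (Or.inr (Or.inr (Or.inr (Or.inr (Or.inr (Or.inr (Or.inr (Or.inr (Or.inl (rfl))))))))))))))))), rfl, h⟩
      · simp at h
    · rcases hin with h|h|h|h|h
      · exact ⟨("amazon", 3), Or.inr (Or.inr (Or.inr (Or.inr (Or.inr (Or.inr (Or.inr (Or.inr (Or.inr (Or.inr (Or.inr (Or.inr (Or.inr (Or.inr (Or.inr (Or.inr (Or.inr (Or.inl (rfl)))))))))))))))))), rfl, h⟩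
      · exact ⟨("store", 3), Or.inr (Or.inr (Or.inr (Or.inr (Or.inr (Or.inr (Or.inr (Or.inr (Or.inr (Or.inr (Or.inr (Or.inr (Or.inr (Or.inr (Or.inr (Or.inr (Or.inr (Or.inr (Or.inl (rfl))))))))))))))))))), rfl, h⟩
      · exact ⟨("shop", 3), Or.inr (Or.inr (Or.inr (Or.inr (Or.inr (Or.inr (Or.inr (Or.inr (Or.inr (Or.inr (Or.inr (Or.inr (Or.inr (Or.inr (Or.inr (Or.inr (Or.inr (Or.inr (Or.inr (Or.inl (rfl)))))))))))))))))))), rfl, h⟩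
      · exact ⟨("retail", 3), Or.inr (Or.inr (Or.inr (Or.inr (Or.inr (Or.inr (Or.inr (Or.inr (Or.inr (Or.inr (Or.inr (Or.inr (Or.inr (Or.inr (Or.inr (Or.inr (Or.inr (Or.inr (Or.inr (Or.inr (rfl)))))))))))))))))))), rfl, h⟩
      · simp at h

lemma pvAB :
    ∀ (m c : String),
      enhance_category_with_merchant_py m c = enhance_category_with_merchant_py_alt m c := by
  intro m c
  rw [pvAlt_eq]
  unfold enhance_category_with_merchant_py
  by_cases h0 : (["grocery", "market", "food", "kroger", "walmart", "target"]).any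
      (fun term => PySem.Str.isIn term (PySem.Str.lower m)) = true
  · rw [if_pos h0]
    have hmin : ((pvCands m).filterMap id).min? = some 0 := by
      rw [List.min?_eq_some_iff]
      exact ⟨(pvVals_iff m 0).mpr (Or.inl ⟨rfl, h0⟩), fun r _ => Nat.zero_le r⟩
    rw [hmin]; rfl
  · rw [if_neg h0]
    by_cases h1 : (["gas", "fuel", "shell", "exxon", "bp", "chevron"]).any
        (fun term => PySem.Str.isIn term (PySem.Str.lower m)) = true
    · rw [if_pos h1]
      have hmin : ((pvCands m).filterMap id).min? = some 1 := by
        rw [List.min?_eq_some_iff]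
        refine ⟨(pvVals_iff m 1).mpr (Or.inr (Or.inl ⟨rfl, h1⟩)), fun r hr => ?_⟩
        rcases (pvVals_iff m r).mp hr with ⟨_, hc⟩|⟨hq, _⟩|⟨hq, _⟩|⟨hq, _⟩
        · exact absurd hc h0
        all_goals omega
      rw [hmin]; rfl
    · rw [if_neg h1]
      by_cases h2 : (["restaurant", "cafe", "coffee", "pizza", "burger"]).any
          (fun term => PySem.Str.isIn term (PySem.Str.lower m)) = true
      · rw [if_pos h2]
        have hmin : ((pvCands m).filterMap id).min? = some 2 := by
          rw [List.min?_eq_some_iff]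
          refine ⟨(pvVals_iff m 2).mpr (Or.inr (Or.inr (Or.inl ⟨rfl, h2⟩))), fun r hr => ?_⟩
          rcases (pvVals_iff m r).mp hr with ⟨_, hc⟩|⟨_, hc⟩|⟨hq, _⟩|⟨hq, _⟩
          · exact absurd hc h0
          · exact absurd hc h1
          all_goals omega
        rw [hmin]; rfl
      · rw [if_neg h2]
        by_cases h3 : (["amazon", "store", "shop", "retail"]).any
            (fun term => PySem.Str.isIn term (PySem.Str.lower m)) = true
        · rw [if_pos h3]
          have hmin : ((pvCands m).filterMap id).min? = some 3 := by
            rw [List.min?_eq_some_iff]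
            refine ⟨(pvVals_iff m 3).mpr (Or.inr (Or.inr (Or.inr ⟨rfl, h3⟩))), fun r hr => ?_⟩
            rcases (pvVals_iff m r).mp hr with ⟨_, hc⟩|⟨_, hc⟩|⟨_, hc⟩|⟨hq, _⟩
            · exact absurd hc h0
            · exact absurd hc h1
            · exact absurd hc h2
            all_goals omega
          rw [hmin]; rfl
        · rw [if_neg h3]
          have hnil : (pvCands m).filterMap id = [] := by
            rw [List.eq_nil_iff_forall_not_mem]
            intro r hr
            rcases (pvVals_iff m r).mp hr with ⟨_, hc⟩|⟨_, hc⟩|⟨_, hc⟩|⟨_, hc⟩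
            · exact h0 hc
            · exact h1 hc
            · exact h2 hc
            · exact h3 hc
          rw [hnil]; rfl

-- ===== VERDICT (by name: the statement is the Claim_ definition above) =====
theorem enhance_category_with_merchant_py_spec : Claim_equal_enhance_category_with_merchant_py := by
  intro merchant_name current_category _
  unfold Spec_enhance_category_with_merchant_py
  exact pvAB merchant_name current_category
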